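-- pv_equiv track=rewrite | github.com/tongjiaming/AI4PP | part1/delete_last_token.py | delete_last_token
-- ===== SOURCE A (Python) =====
-- def delete_last_token(data):
--     processed_data = []
--     for s in data:
--         while '\n' in s and len(s) <=512:
--             i = s.find('\n')
--             sentence = s[:i]
--             s = s[i+2:]
--             if ' ' in sentence:
--                 j = sentence.rfind(' ')
--                 deleted = sentence[:j]
--                 processed_data.append({'origin': sentence, 'deleted': deleted})
--
--     return processed_data
-- ===== SOURCE B (Python) =====
-- def delete_last_token(data):
--     processed_data = []
--     for s in data:
--         if len(s) > 512:
--             continue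
--         cur = []
--         last_space = -1
--         skip = False
--         for ch in s:
--             if skip:
--                 skip = False
--             elif ch == '\n':
--                 if last_space >= 0:
--                     sentence = ''.join(cur)
--                     processed_data.append({'origin': sentence, 'deleted': sentence[:last_space]})
--                 cur = []
--                 last_space = -1
--                 skip = True
--             else:
--                 if ch == ' ':
--                     last_space = len(cur)
--                 cur.append(ch)
--     return processed_data
-- ===== Notes on version B (the rewrite author's own statement) =====
-- stated objective: alternative
-- what changed: One left-to-right character pass per string tracking the current sentence and its last-space index incrementally (with a single up-front length-512 check, valid since the remainder only shrinks) replaces A's repeated find/rfind plus re-slicing of the remaining string; the char-at-a-time loop trades C-level slicing speed for a single traversal.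
import Mathlib
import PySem

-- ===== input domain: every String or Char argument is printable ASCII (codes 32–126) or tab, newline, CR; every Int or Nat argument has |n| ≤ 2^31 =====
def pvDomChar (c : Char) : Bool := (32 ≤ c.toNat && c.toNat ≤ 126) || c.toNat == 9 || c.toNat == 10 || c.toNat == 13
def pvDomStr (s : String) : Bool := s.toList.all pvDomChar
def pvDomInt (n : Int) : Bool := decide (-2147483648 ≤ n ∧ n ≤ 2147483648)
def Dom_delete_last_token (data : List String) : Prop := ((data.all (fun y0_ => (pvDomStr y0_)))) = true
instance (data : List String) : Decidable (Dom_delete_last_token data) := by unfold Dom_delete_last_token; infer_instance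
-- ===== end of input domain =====

-- B replaces A's repeated find/rfind + re-slicing of the remainder with one left-to-right
-- character pass per string that tracks the last-space index incrementally (same return value).

-- ===== PORT A =====
-- Inner while-loop of A over the remaining string (as List Char).
-- Exactness notes: under the guard '\n' ∈ cs, Python s.find('\n') = cs.idxOf '\n';
-- s[:i] with 0 ≤ i = cs.take i; s[i+2:] = cs.drop (i+2); under ' ' ∈ sentence,
-- sentence.rfind(' ') = sentence.length - 1 - sentence.reverse.idxOf ' ' (≥ 0).
def pvLoopA (cs : List Char) (acc : List (List (String × String))) :
    List (List (String × String)) :=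
  if h : ('\n' ∈ cs) ∧ cs.length ≤ 512 then
    let i := cs.idxOf '\n'
    let sentence := cs.take i
    let acc' :=
      if ' ' ∈ sentence then
        let j := sentence.length - 1 - sentence.reverse.idxOf ' '
        acc ++ [[("origin", String.ofList sentence), ("deleted", String.ofList (sentence.take j))]]
      else acc
    pvLoopA (cs.drop (i + 2)) acc'
  else acc
termination_by cs.length
decreasing_by
  have : cs ≠ [] := by intro hn; rw [hn] at h; simp at h
  have : 0 < cs.length := List.length_pos_iff.mpr this
  simp only [List.length_drop]; omega

def delete_last_token (data : List String) : List (List (String × String)) :=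
  data.foldl (fun acc s => pvLoopA s.toList acc) []

-- ===== PORT B =====
-- Inner for-loop of B: one pass over the characters, carrying the current sentence `cur`,
-- the index of its last space (`lastSpace`, -1 if none), and the skip-next-char flag.
-- Exactness notes: sentence[:last_space] with 0 ≤ last_space = take lastSpace.toNat.
def pvLoopB (cs : List Char) (cur : List Char) (lastSpace : Int) (skip : Bool)
    (acc : List (List (String × String))) : List (List (String × String)) :=
  match cs with
  | [] => acc
  | ch :: rest =>
    if skip then pvLoopB rest cur lastSpace false acc
    else if ch = '\n' then
      let acc' :=
        if lastSpace ≥ 0 then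
          acc ++ [[("origin", String.ofList cur), ("deleted", String.ofList (cur.take lastSpace.toNat))]]
        else acc
      pvLoopB rest [] (-1) true acc'
    else
      let lastSpace' := if ch = ' ' then (cur.length : Int) else lastSpace
      pvLoopB rest (cur ++ [ch]) lastSpace' false acc

def delete_last_token_alt (data : List String) : List (List (String × String)) :=
  data.foldl
    (fun acc s => if s.toList.length > 512 then acc else pvLoopB s.toList [] (-1) false acc) []

-- ===== PRECONDITION & SPEC =====
def Spec_delete_last_token (data : List String) (out : List (List (String × String))) : Prop := out = delete_last_token_alt data
instance (data : List String) (out : List (List (String × String))) : Decidable (Spec_delete_last_token data out) := by unfold Spec_delete_last_token; infer_instance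

-- ===== CLAIM (what is proved, stated in full; the proofs are below) =====
def Claim_equal_delete_last_token : Prop := ∀ (data : List String), Dom_delete_last_token data → Spec_delete_last_token data (delete_last_token data)

-- ===== LEMMAS AND PROOFS =====

-- The last-space index B maintains, as a function of the current sentence.
def lsp (cur : List Char) : Int :=
  if ' ' ∈ cur then ((cur.length - 1 - cur.reverse.idxOf ' ' : Nat) : Int) else -1

lemma lsp_nonneg_iff (cur : List Char) : lsp cur ≥ 0 ↔ ' ' ∈ cur := by
  unfold lsp; split_ifs with h <;> simp [h]

lemma idxOf_lt_length_of_mem {a : Char} {l : List Char} (h : a ∈ l) : l.idxOf a < l.length :=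
  List.idxOf_lt_length_of_mem h

-- B's update of last_space maintains lsp.
lemma lsp_snoc (cur : List Char) (ch : Char) :
    lsp (cur ++ [ch]) = if ch = ' ' then (cur.length : Int) else lsp cur := by
  unfold lsp
  by_cases hc : ch = ' '
  · subst hc
    simp [List.reverse_append, List.idxOf_cons_self]
  · have hmem : ' ' ∈ cur ++ [ch] ↔ ' ' ∈ cur := by simp [Ne.symm (by simpa using hc)]
    by_cases hs : ' ' ∈ cur
    · have hlt := idxOf_lt_length_of_mem ((List.mem_reverse).mpr hs)
      rw [List.length_reverse] at hlt
      have hidx : (cur ++ [ch]).reverse.idxOf ' ' = cur.reverse.idxOf ' ' + 1 := by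
        rw [List.reverse_append]
        simpa using List.idxOf_cons_ne cur.reverse hc
      simp only [hmem, hs, if_true, hc, if_false, hidx, List.length_append, List.length_singleton]
      congr 1
      omega
    · simp [hmem, hs, hc]

-- Main scan lemma: B's inner loop, started mid-sentence with consistent state, equals
-- "find next newline, emit, skip one char, restart".
lemma loopB_scan (cs : List Char) : ∀ (cur : List Char) (acc : List (List (String × String))),
    pvLoopB cs cur (lsp cur) false acc =
      if _h : '\n' ∈ cs then
        let i := cs.idxOf '\n'
        let sentence := cur ++ cs.take i
        let acc' :=
          if ' ' ∈ sentence then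
            acc ++ [[("origin", String.ofList sentence),
                     ("deleted", String.ofList (sentence.take (lsp sentence).toNat))]]
          else acc
        pvLoopB (cs.drop (i + 1)) [] (-1) true acc'
      else acc := by
  induction cs with
  | nil => intro _ acc; simp [pvLoopB]
  | cons ch rest ih =>
    intro cur acc
    by_cases hch : ch = '\n'
    · subst hch
      have hmem : '\n' ∈ '\n' :: rest := List.mem_cons_self
      rw [pvLoopB]
      simp only [Bool.false_eq_true, if_neg (by simp : ¬False)]
      have hgd : lsp cur ≥ 0 ↔ ' ' ∈ cur := lsp_nonneg_iff cur
      rw [dif_pos hmem]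
      simp only [List.idxOf_cons_self, List.take_zero, List.append_nil, List.drop_succ_cons,
        List.drop_zero]
      by_cases h1 : lsp cur ≥ 0
      · rw [if_pos h1, if_pos (hgd.mp h1)]; simp
      · rw [if_neg h1, if_neg (fun hx => h1 (hgd.mpr hx))]; simp
    · rw [pvLoopB]
      simp only [if_neg hch, if_neg (by simp : ¬(false = true))]
      have hstep : (if ch = ' ' then (cur.length : Int) else lsp cur) = lsp (cur ++ [ch]) :=
        (lsp_snoc cur ch).symm
      rw [hstep, ih (cur ++ [ch]) acc]
      have hmem : '\n' ∈ ch :: rest ↔ '\n' ∈ rest := by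
        simp [Ne.symm (by simpa using hch)]
      by_cases hr : '\n' ∈ rest
      · rw [dif_pos hr, dif_pos (hmem.mpr hr)]
        have hidx : (ch :: rest).idxOf '\n' = rest.idxOf '\n' + 1 :=
          List.idxOf_cons_ne _ (by simpa using hch)
        simp only [hidx, List.take_succ_cons, List.drop_succ_cons]
        have hsen : cur ++ ch :: rest.take (rest.idxOf '\n') =
            (cur ++ [ch]) ++ rest.take (rest.idxOf '\n') := by simp
        rw [hsen]
      · rw [dif_neg hr, dif_neg (fun hx => hr (hmem.mp hx))]

-- Once ≤ 512, A's loop equals B's pass.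
lemma loopA_eq_loopB (n : Nat) : ∀ (cs : List Char), cs.length ≤ n → cs.length ≤ 512 →
    ∀ acc, pvLoopA cs acc = pvLoopB cs [] (-1) false acc := by
  induction n with
  | zero =>
    intro cs h0 _ acc
    have : cs = [] := List.eq_nil_of_length_eq_zero (Nat.le_zero.mp h0)
    subst this; rw [pvLoopA]; simp [pvLoopB]
  | succ n ih =>
    intro cs hn h512 acc
    have hlsp : (-1 : Int) = lsp [] := by simp [lsp]
    by_cases hm : '\n' ∈ cs
    · rw [pvLoopA, dif_pos ⟨hm, h512⟩, hlsp, loopB_scan cs [] acc, dif_pos hm]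
      simp only [List.nil_append]
      set i := cs.idxOf '\n' with hi
      have hilt : i < cs.length := idxOf_lt_length_of_mem hm
      -- match the two emitted records
      have hrec : (if ' ' ∈ cs.take i then
            acc ++ [[("origin", String.ofList (cs.take i)),
                     ("deleted", String.ofList ((cs.take i).take ((cs.take i).length - 1 - (cs.take i).reverse.idxOf ' ')))]]
          else acc) =
          (if ' ' ∈ cs.take i then
            acc ++ [[("origin", String.ofList (cs.take i)),
                     ("deleted", String.ofList ((cs.take i).take (lsp (cs.take i)).toNat))]]
          else acc) := by
        split_ifs with hs
        · unfold lsp; rw [if_pos hs]; simp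
        · rfl
      rw [hrec]
      set acc' := (if ' ' ∈ cs.take i then
            acc ++ [[("origin", String.ofList (cs.take i)),
                     ("deleted", String.ofList ((cs.take i).take (lsp (cs.take i)).toNat))]]
          else acc)
      -- relate skip-step: pvLoopB (drop (i+1)) [] -1 true = pvLoopB (drop (i+2)) [] -1 false
      rcases hdrop : cs.drop (i + 1) with _ | ⟨x, xs⟩
      · have h2 : cs.drop (i + 2) = [] := by
          have hl := congrArg List.length hdrop
          simp only [List.length_drop, List.length_nil] at hl
          exact List.drop_eq_nil_of_le (by omega)
        rw [h2, pvLoopA]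
        simp [pvLoopB]
      · have h2 : cs.drop (i + 2) = xs := by
          have : cs.drop (i + 2) = (cs.drop (i+1)).drop 1 := by
            rw [List.drop_drop]
          rw [this, hdrop]; simp
        rw [pvLoopB, if_pos rfl, h2]
        have hl := congrArg List.length hdrop
        simp only [List.length_drop, List.length_cons] at hl
        have hlen : xs.length ≤ n := by omega
        exact ih xs hlen (by omega) acc'
    · rw [pvLoopA, dif_neg (by intro h; exact hm h.1), hlsp, loopB_scan cs [] acc, dif_neg hm]

lemma step_eq (s : String) (acc : List (List (String × String))) :
    pvLoopA s.toList acc =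
      (if s.toList.length > 512 then acc else pvLoopB s.toList [] (-1) false acc) := by
  by_cases h : s.toList.length > 512
  · rw [if_pos h, pvLoopA, dif_neg (by intro hx; omega)]
  · rw [if_neg h]
    exact loopA_eq_loopB s.toList.length s.toList le_rfl (by omega) acc

-- ===== VERDICT (by name: the statement is the Claim_ definition above) =====
theorem delete_last_token_spec : Claim_equal_delete_last_token := by
  intro data _
  unfold Spec_delete_last_token delete_last_token delete_last_token_alt
  congr 1
  funext acc s
  exact step_eq s acc
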